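-- pv_equiv track=rewrite | github.com/bataa7/cad-toolkit | block_finder.py | _resolve_merged_identifier_map
-- ===== SOURCE A (Python) =====
-- from typing import List, Dict, Any, Optional, Tuple, Set
--
-- def _resolve_merged_identifier_map(
--
--     merged_identifier_map: Dict[str, str],
--     visible_identifiers: Set[str],
-- ) -> Dict[str, str]:
--     """
--     将合并链路解析到最终仍然可见的代表标识符。
--     """
--     resolved_map: Dict[str, str] = {}
--
--     for identifier, representative in merged_identifier_map.items():
--         if identifier in visible_identifiers:
--             continue
--
--         current = representative
--         seen = {identifier}
--         while current in merged_identifier_map and current not in visible_identifiers and current not in seen: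
--             seen.add(current)
--             current = merged_identifier_map[current]
--
--         if current in visible_identifiers:
--             resolved_map[identifier] = current
--
--     return resolved_map
-- ===== SOURCE B (Python) =====
-- def _resolve_merged_identifier_map(merged_identifier_map, visible_identifiers):
--     # Memoized chain resolution with path compression: each node's final visible
--     # representative (or None) is computed once, so total work is linear.
--     memo = {}
--
--     def resolve(start):
--         path = []
--         on_path = set()
--         cur = start
--         while True:
--             if cur in visible_identifiers:
--                 res = cur
--                 break
--             if cur in memo:
--                 res = memo[cur]
--                 break
--             if cur in on_path or cur not in merged_identifier_map:
--                 res = None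
--                 break
--             path.append(cur)
--             on_path.add(cur)
--             cur = merged_identifier_map[cur]
--         for node in path:
--             memo[node] = res
--         return res
--
--     resolved_map = {}
--     for identifier, representative in merged_identifier_map.items():
--         if identifier not in visible_identifiers:
--             target = resolve(representative)
--             if target is not None:
--                 resolved_map[identifier] = target
--     return resolved_map
-- ===== Notes on version B (the rewrite author's own statement) =====
-- stated objective: alternative
-- what changed: Instead of re-walking the merge chain from scratch for every key (with a fresh 'seen' set each time), B resolves each node once via a memo table with path compression: after one walk, every node on the walked path is recorded with its final visible representative (or None for cycles/dead ends) and later walks stop at the first memoized node; this is asymptotically better on long chains (O(n^2) worst case vs O(n)) though not measurably faster on random short-chain inputs.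
import Mathlib
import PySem

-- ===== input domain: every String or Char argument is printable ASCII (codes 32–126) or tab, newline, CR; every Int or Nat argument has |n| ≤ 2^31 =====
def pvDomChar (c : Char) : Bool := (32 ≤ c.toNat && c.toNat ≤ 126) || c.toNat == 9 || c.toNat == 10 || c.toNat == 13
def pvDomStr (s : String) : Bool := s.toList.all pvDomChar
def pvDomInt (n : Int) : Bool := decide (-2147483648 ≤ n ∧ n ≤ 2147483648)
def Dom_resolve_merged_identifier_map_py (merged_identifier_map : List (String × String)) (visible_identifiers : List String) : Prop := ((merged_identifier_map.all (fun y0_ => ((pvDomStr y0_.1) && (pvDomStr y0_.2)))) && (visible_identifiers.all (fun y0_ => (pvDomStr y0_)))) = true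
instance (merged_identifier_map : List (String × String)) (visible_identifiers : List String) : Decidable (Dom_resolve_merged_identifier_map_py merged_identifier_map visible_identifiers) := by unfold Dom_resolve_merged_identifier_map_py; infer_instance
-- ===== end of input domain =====

-- B replaces A's per-key chain re-walk by a single memoized resolution with path
-- compression: each node's final visible representative (or none) is computed once
-- and reused across keys.

-- ===== PORT A =====
-- the 'while current in map and current not in visible and current not in seen' loop;
-- fuel = |map| + 1 only makes the recursion total, it is never exhausted (seen grows
-- by one distinct key of the map at every step)
def pvAWalk (m : PySem.Dict String String) (vis : List String) : Nat → PySem.Set String → String → String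
  | 0, _, cur => cur
  | fuel+1, seen, cur =>
    if m.contains cur && !(PySem.Set.contains vis cur) && !(PySem.Set.contains seen cur) then
      pvAWalk m vis fuel (PySem.Set.add seen cur) (m.getD cur "")
    else cur

-- body of A's 'for identifier, representative in merged_identifier_map.items()' loop
def pvAStep (m : PySem.Dict String String) (vis : List String) (fuel : Nat)
    (resolved : PySem.Dict String String) (kv : String × String) : PySem.Dict String String :=
  if PySem.Set.contains vis kv.1 then resolved
  else
    let cur := pvAWalk m vis fuel (PySem.Set.add PySem.Set.empty kv.1) kv.2
    if PySem.Set.contains vis cur then resolved.insert kv.1 cur else resolved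

def resolve_merged_identifier_map_py (merged_identifier_map : List (String × String)) (visible_identifiers : List String) : List (String × String) :=
  let m : PySem.Dict String String := PySem.Dict.mk merged_identifier_map
  (m.items.foldl (pvAStep m visible_identifiers (merged_identifier_map.length + 1)) PySem.Dict.empty).items

-- ===== PORT B =====
-- B's inner 'resolve' while-loop: walk until visible / memo hit / cycle / dead end,
-- carrying the path list and its membership set; fuel = |map| + 1 only makes the
-- recursion total (the path gains a distinct key of the map at every step)
def pvBLoop (m : PySem.Dict String String) (vis : List String) (memo : PySem.Dict String (Option String)) :
    Nat → List String → PySem.Set String → String → Option String × List String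
  | 0, path, _, _ => (none, path)
  | fuel+1, path, onPath, cur =>
    if PySem.Set.contains vis cur then (some cur, path)
    else
      match memo.get? cur with
      | some r => (r, path)
      | none =>
        if PySem.Set.contains onPath cur || !(m.contains cur) then (none, path)
        else pvBLoop m vis memo fuel (path ++ [cur]) (PySem.Set.add onPath cur) (m.getD cur "")

-- body of B's outer loop: resolve the representative, memoize the walked path, record
def pvBStep (m : PySem.Dict String String) (vis : List String) (fuel : Nat)
    (st : PySem.Dict String (Option String) × PySem.Dict String String)
    (kv : String × String) : PySem.Dict String (Option String) × PySem.Dict String String :=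
  if !(PySem.Set.contains vis kv.1) then
    let res := pvBLoop m vis st.1 fuel [] PySem.Set.empty kv.2
    let memo := res.2.foldl (fun mm n => mm.insert n res.1) st.1
    match res.1 with
    | some t => (memo, st.2.insert kv.1 t)
    | none => (memo, st.2)
  else st

def resolve_merged_identifier_map_py_alt (merged_identifier_map : List (String × String)) (visible_identifiers : List String) : List (String × String) :=
  let m : PySem.Dict String String := PySem.Dict.mk merged_identifier_map
  (m.items.foldl (pvBStep m visible_identifiers (merged_identifier_map.length + 1))
    (PySem.Dict.empty, PySem.Dict.empty)).2.items

-- ===== PRECONDITION & SPEC =====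
-- Pre_ excludes association lists with duplicate keys: a Python dict can never contain
-- them, so such lists represent no actual input of A and the ports' first-match
-- behaviour on them is an artefact of the list encoding of dicts.
def Pre_resolve_merged_identifier_map_py (merged_identifier_map : List (String × String)) (visible_identifiers : List String) : Prop :=
  (merged_identifier_map.map Prod.fst).Nodup
instance (merged_identifier_map : List (String × String)) (visible_identifiers : List String) : Decidable (Pre_resolve_merged_identifier_map_py merged_identifier_map visible_identifiers) := by unfold Pre_resolve_merged_identifier_map_py; infer_instance

def pvWitness_resolve_merged_identifier_map_py : (List (String × String)) × List String :=
  ([("a", "b"), ("b", "c")], ["c"])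

def Spec_resolve_merged_identifier_map_py (merged_identifier_map : List (String × String)) (visible_identifiers : List String) (out : List (String × String)) : Prop := out = resolve_merged_identifier_map_py_alt merged_identifier_map visible_identifiers
instance (merged_identifier_map : List (String × String)) (visible_identifiers : List String) (out : List (String × String)) : Decidable (Spec_resolve_merged_identifier_map_py merged_identifier_map visible_identifiers out) := by unfold Spec_resolve_merged_identifier_map_py; infer_instance

-- ===== CLAIM (what is proved, stated in full; the proofs are below) =====
def Claim_equal_resolve_merged_identifier_map_py : Prop := ∀ (merged_identifier_map : List (String × String)) (visible_identifiers : List String), Dom_resolve_merged_identifier_map_py merged_identifier_map visible_identifiers → Pre_resolve_merged_identifier_map_py merged_identifier_map visible_identifiers → Spec_resolve_merged_identifier_map_py merged_identifier_map visible_identifiers (resolve_merged_identifier_map_py merged_identifier_map visible_identifiers)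

-- ===== LEMMAS AND PROOFS =====

-- the one-step successor and the chain iterates of the merge map
def pvNxt (m : List (String × String)) (x : String) : String := (PySem.Dict.mk m).getD x ""
def pvIt (m : List (String × String)) (j : Nat) (x : String) : String := (pvNxt m)^[j] x
-- a node the walk can step through: a key of the map that is not visible
def pvOk (m : List (String × String)) (vis : List String) (x : String) : Bool :=
  (PySem.Dict.mk m).contains x && !(PySem.Set.contains vis x)
def pvOkTo (m : List (String × String)) (vis : List String) (s : Nat) (x : String) : Prop :=
  ∀ j, j < s → pvOk m vis (pvIt m j x) = true
-- the chain from x reaches a visible node after s steps, stepping only through ok nodes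
def pvGood (m : List (String × String)) (vis : List String) (x : String) (s : Nat) : Prop :=
  pvOkTo m vis s x ∧ PySem.Set.contains vis (pvIt m s x) = true
-- the mathematical resolution: the first visible node on the chain from x, if any
noncomputable def pvRes (m : List (String × String)) (vis : List String) (x : String) : Option String :=
  @dite _ (∃ s, pvGood m vis x s) (Classical.propDecidable _)
    (fun _ => some (pvIt m (sInf {s | pvGood m vis x s}) x)) (fun _ => none)
-- every memo entry is the true resolution of its key
def pvInv (m : List (String × String)) (vis : List String) (memo : PySem.Dict String (Option String)) : Prop :=
  ∀ x r, memo.get? x = some r → pvRes m vis x = r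
-- the reference fold both ports are reduced to
noncomputable def pvRefStep (m : List (String × String)) (vis : List String)
    (out : PySem.Dict String String) (kv : String × String) : PySem.Dict String String :=
  if PySem.Set.contains vis kv.1 then out
  else match pvRes m vis kv.2 with
    | some t => out.insert kv.1 t
    | none => out

lemma pvIt_zero (m : List (String × String)) (x : String) : pvIt m 0 x = x := rfl

lemma pvIt_succ (m : List (String × String)) (j : Nat) (x : String) :
    pvIt m (j+1) x = pvIt m j (pvNxt m x) := by
  simp [pvIt, Function.iterate_succ_apply]

lemma pvIt_succ' (m : List (String × String)) (j : Nat) (x : String) :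
    pvIt m (j+1) x = pvNxt m (pvIt m j x) := by
  simp [pvIt, Function.iterate_succ_apply']

lemma pvIt_add (m : List (String × String)) (a b : Nat) (x : String) :
    pvIt m (a + b) x = pvIt m a (pvIt m b x) := by
  simp [pvIt, Function.iterate_add_apply]

lemma pvOkTo_succ (m : List (String × String)) (vis : List String) (s : Nat) (x : String) :
    pvOkTo m vis (s+1) x ↔ pvOk m vis x = true ∧ pvOkTo m vis s (pvNxt m x) := by
  constructor
  · intro h
    refine ⟨h 0 (Nat.succ_pos _), fun j hj => ?_⟩
    have := h (j+1) (by omega)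
    rwa [pvIt_succ] at this
  · rintro ⟨h0, h⟩ j hj
    cases j with
    | zero => exact h0
    | succ j => rw [pvIt_succ]; exact h j (by omega)

lemma pvOkTo_mono (m : List (String × String)) (vis : List String) {s t : Nat} (hst : s ≤ t)
    {x : String} (h : pvOkTo m vis t x) : pvOkTo m vis s x :=
  fun j hj => h j (by omega)

lemma pvGood_not_ok_zero (m : List (String × String)) (vis : List String) {x : String}
    (hok : pvOk m vis x = true) : ¬ pvGood m vis x 0 := by
  rintro ⟨-, hvis⟩
  rw [pvIt_zero] at hvis
  simp only [pvOk, Bool.and_eq_true, Bool.not_eq_true'] at hok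
  rw [hok.2] at hvis
  simp at hvis

lemma pvGood_shift (m : List (String × String)) (vis : List String) {x : String}
    (hok : pvOk m vis x = true) (s : Nat) :
    pvGood m vis x (s+1) ↔ pvGood m vis (pvNxt m x) s := by
  unfold pvGood
  rw [pvOkTo_succ, pvIt_succ]
  constructor
  · rintro ⟨⟨-, h⟩, hv⟩; exact ⟨h, hv⟩
  · rintro ⟨h, hv⟩; exact ⟨⟨hok, h⟩, hv⟩

lemma pvRes_pos (m : List (String × String)) (vis : List String) (x : String)
    (h : ∃ s, pvGood m vis x s) :
    pvRes m vis x = some (pvIt m (sInf {s | pvGood m vis x s}) x) := by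
  unfold pvRes
  rw [dif_pos h]

lemma pvRes_neg (m : List (String × String)) (vis : List String) (x : String)
    (h : ¬ ∃ s, pvGood m vis x s) : pvRes m vis x = none := by
  unfold pvRes
  rw [dif_neg h]

-- the single case-analysis API for pvRes
lemma pvRes_spec (m : List (String × String)) (vis : List String) (x : String) :
    (pvRes m vis x = none ∧ ∀ s, ¬ pvGood m vis x s) ∨
    (∃ s, pvRes m vis x = some (pvIt m s x) ∧ pvGood m vis x s ∧ ∀ t, t < s → ¬ pvGood m vis x t) := by
  by_cases h : ∃ s, pvGood m vis x s
  · right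
    refine ⟨sInf {s | pvGood m vis x s}, pvRes_pos m vis x h, Nat.sInf_mem h, ?_⟩
    intro t ht hgt
    have : sInf {s | pvGood m vis x s} ≤ t := Nat.sInf_le hgt
    omega
  · left
    exact ⟨pvRes_neg m vis x h, fun s hs => h ⟨s, hs⟩⟩

lemma pvRes_vis (m : List (String × String)) (vis : List String) (x : String)
    (hv : PySem.Set.contains vis x = true) : pvRes m vis x = some x := by
  have hg : pvGood m vis x 0 := ⟨fun j hj => absurd hj (by omega), by rwa [pvIt_zero]⟩
  rcases pvRes_spec m vis x with ⟨-, hnone⟩ | ⟨s, heq, -, hmin⟩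
  · exact absurd hg (hnone 0)
  · have hs : s = 0 := by
      by_contra hs
      exact hmin 0 (by omega) hg
    rw [heq, hs, pvIt_zero]

lemma pvRes_stuck (m : List (String × String)) (vis : List String) (x : String)
    (hv : PySem.Set.contains vis x = false) (hk : (PySem.Dict.mk m).contains x = false) :
    pvRes m vis x = none := by
  apply pvRes_neg
  rintro ⟨s, hok, hvis⟩
  cases s with
  | zero =>
    rw [pvIt_zero, hv] at hvis
    simp at hvis
  | succ s =>
    have := hok 0 (Nat.succ_pos _)
    rw [pvIt_zero] at this
    simp only [pvOk, Bool.and_eq_true] at this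
    rw [hk] at this
    simp at this

lemma pvRes_step (m : List (String × String)) (vis : List String) (x : String)
    (hok : pvOk m vis x = true) : pvRes m vis x = pvRes m vis (pvNxt m x) := by
  by_cases h : ∃ s, pvGood m vis (pvNxt m x) s
  · obtain ⟨s, hs⟩ := h
    rcases pvRes_spec m vis x with ⟨-, hnone⟩ | ⟨a, heqa, hga, hmina⟩
    · exact absurd ((pvGood_shift m vis hok s).2 hs) (hnone (s+1))
    rcases pvRes_spec m vis (pvNxt m x) with ⟨-, hnone⟩ | ⟨b, heqb, hgb, hminb⟩
    · exact absurd hs (hnone s)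
    have ha0 : a ≠ 0 := by
      intro h0
      exact pvGood_not_ok_zero m vis hok (h0 ▸ hga)
    obtain ⟨a', rfl⟩ : ∃ a', a = a' + 1 := ⟨a - 1, by omega⟩
    have hga' : pvGood m vis (pvNxt m x) a' := (pvGood_shift m vis hok a').1 hga
    have hab : a' = b := by
      by_contra hne
      rcases Nat.lt_or_ge a' b with hlt | hge
      · exact hminb a' hlt hga'
      · have hlt : b < a' := by omega
        exact hmina (b+1) (by omega) ((pvGood_shift m vis hok b).2 hgb)
    rw [heqa, heqb, hab, pvIt_succ]
  · have hx : ¬ ∃ s, pvGood m vis x s := by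
      rintro ⟨s, hs⟩
      cases s with
      | zero => exact pvGood_not_ok_zero m vis hok hs
      | succ s => exact h ⟨s, (pvGood_shift m vis hok s).1 hs⟩
    rw [pvRes_neg m vis x hx, pvRes_neg m vis (pvNxt m x) h]

lemma pvRes_chain (m : List (String × String)) (vis : List String) (y : String) (J : Nat)
    (hok : pvOkTo m vis J y) : ∀ i, i ≤ J → pvRes m vis (pvIt m i y) = pvRes m vis y := by
  intro i
  induction i with
  | zero => intro _; rw [pvIt_zero]
  | succ i ih =>
    intro hi
    have h1 : pvRes m vis (pvIt m i y) = pvRes m vis y := ih (by omega)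
    have h2 : pvOk m vis (pvIt m i y) = true := hok i (by omega)
    rw [pvIt_succ', ← pvRes_step m vis _ h2, h1]

lemma pv_iterate_mod (f : String → String) (p : Nat) (hp : 0 < p) (y : String)
    (hf : f^[p] y = y) : ∀ q, f^[q] y = f^[q % p] y := by
  intro q
  induction q using Nat.strong_induction_on with
  | _ q ih =>
    by_cases hq : q < p
    · rw [Nat.mod_eq_of_lt hq]
    · rw [Nat.not_lt] at hq
      have h2 : f^[q] y = f^[q - p] y := by
        conv_lhs => rw [show q = (q - p) + p from by omega]
        rw [Function.iterate_add_apply, hf]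
      rw [h2, ih (q - p) (by omega), Nat.mod_eq_sub_mod hq]

lemma pvIt_mod (m : List (String × String)) (p : Nat) (hp : 0 < p) (z : String)
    (hz : pvIt m p z = z) : ∀ q, pvIt m q z = pvIt m (q % p) z := by
  intro q
  exact pv_iterate_mod (pvNxt m) p hp z hz q

lemma pvRes_cycle (m : List (String × String)) (vis : List String) (x : String) (a : Nat)
    (ha : 0 < a) (hcyc : pvIt m a x = x) (hok : pvOkTo m vis a x) : pvRes m vis x = none := by
  apply pvRes_neg
  rintro ⟨s, hsok, hvis⟩
  rw [pvIt_mod m a ha x hcyc s] at hvis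
  have hthis := hok (s % a) (Nat.mod_lt _ ha)
  simp only [pvOk, Bool.and_eq_true, Bool.not_eq_true'] at hthis
  rw [hthis.2] at hvis
  simp at hvis

lemma pv_prefix_distinct (m : List (String × String)) (vis : List String) (x : String) (s : Nat)
    (hg : pvGood m vis x s) (hmin : ∀ t, t < s → ¬ pvGood m vis x t) :
    ∀ i j, i < j → j ≤ s → pvIt m i x ≠ pvIt m j x := by
  intro i j hij hjs heq
  have hp0 : 0 < j - i := by omega
  have hcyc : pvIt m (j - i) (pvIt m i x) = pvIt m i x := by
    rw [← pvIt_add, show j - i + i = j from by omega, ← heq]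
  have hmod := pvIt_mod m (j - i) hp0 (pvIt m i x) hcyc
  have hlt : i + (s - i) % (j - i) < s := by
    have := Nat.mod_lt (s - i) hp0
    omega
  apply hmin (i + (s - i) % (j - i)) hlt
  refine ⟨pvOkTo_mono m vis (by omega) hg.1, ?_⟩
  have hval : pvIt m s x = pvIt m (i + (s - i) % (j - i)) x := by
    calc pvIt m s x = pvIt m (s - i) (pvIt m i x) := by
          rw [← pvIt_add]; congr 1; omega
      _ = pvIt m ((s - i) % (j - i)) (pvIt m i x) := hmod (s - i)
      _ = pvIt m ((s - i) % (j - i) + i) x := (pvIt_add m _ i x).symm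
      _ = pvIt m (i + (s - i) % (j - i)) x := by congr 1; omega
  rw [← hval]
  exact hg.2

-- distinct ok nodes are distinct keys of the map, so at most m.length of them
lemma pv_len_bound (m : List (String × String)) (vis : List String) (y : String) (j : Nat)
    (hok : pvOkTo m vis j y)
    (hdist : ∀ i1 i2, i1 < i2 → i2 < j → pvIt m i1 y ≠ pvIt m i2 y) : j ≤ m.length := by
  classical
  set L := (List.range j).map (fun i => pvIt m i y) with hL
  have hnd : L.Nodup := by
    rw [hL]
    refine List.Nodup.map_on ?_ (List.nodup_range)
    intro a ha b hb hab
    rcases Nat.lt_trichotomy a b with h | h | h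
    · exact absurd hab (hdist a b h (List.mem_range.1 hb))
    · exact h
    · exact absurd hab.symm (hdist b a h (List.mem_range.1 ha))
  have hsub : ∀ z ∈ L, z ∈ m.map Prod.fst := by
    intro z hz
    rw [hL] at hz
    obtain ⟨i, hi, rfl⟩ := List.mem_map.1 hz
    have hi' := List.mem_range.1 hi
    have := hok i hi'
    simp only [pvOk, Bool.and_eq_true] at this
    have hc : (PySem.Dict.mk m).contains (pvIt m i y) = true := this.1
    rw [PySem.Dict.contains_iff_mem_keys] at hc
    simpa [PySem.Dict.keys] using hc
  have h1 : L.length = j := by simp [hL]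
  have h2 : L.toFinset.card = L.length := List.toFinset_card_of_nodup hnd
  have h3 : L.toFinset ⊆ (m.map Prod.fst).toFinset := by
    intro z hz
    rw [List.mem_toFinset] at hz ⊢
    exact hsub z hz
  have h4 : (m.map Prod.fst).toFinset.card ≤ (m.map Prod.fst).length := List.toFinset_card_le _
  have h5 : (m.map Prod.fst).length = m.length := by simp
  have h6 := Finset.card_le_card h3
  omega

-- ---- A's walk computes pvRes ----

lemma pvAWalk_some (m : List (String × String)) (vis : List String) :
    ∀ s f (seen : PySem.Set String) (x : String),
      pvOkTo m vis s x → PySem.Set.contains vis (pvIt m s x) = true →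
      (∀ j, j < s → PySem.Set.contains seen (pvIt m j x) = false) →
      (∀ i j, i < j → j ≤ s → pvIt m i x ≠ pvIt m j x) →
      s < f →
      pvAWalk (PySem.Dict.mk m) vis f seen x = pvIt m s x := by
  intro s
  induction s with
  | zero =>
    intro f seen x _ hvis _ _ hf
    obtain ⟨f', rfl⟩ : ∃ f', f = f' + 1 := ⟨f - 1, by omega⟩
    rw [pvIt_zero] at hvis
    rw [pvAWalk, hvis]
    simp [pvIt_zero]
  | succ s ih =>
    intro f seen x hok hvis hseen hdist hf
    obtain ⟨f', rfl⟩ : ∃ f', f = f' + 1 := ⟨f - 1, by omega⟩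
    have h0 := hok 0 (Nat.succ_pos _)
    rw [pvIt_zero] at h0
    simp only [pvOk, Bool.and_eq_true, Bool.not_eq_true'] at h0
    have hs0 : PySem.Set.contains seen x = false := by
      have := hseen 0 (Nat.succ_pos _); rwa [pvIt_zero] at this
    rw [pvAWalk, h0.1, h0.2, hs0]
    simp only [Bool.not_false, Bool.and_self, if_true]
    have hnext : (PySem.Dict.mk m).getD x "" = pvNxt m x := rfl
    rw [hnext]
    have hrec := ih f' (PySem.Set.add seen x) (pvNxt m x)
      ((pvOkTo_succ m vis s x).1 hok).2
      (by rw [← pvIt_succ]; exact hvis)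
      ?_ ?_ (by omega)
    · rw [hrec, ← pvIt_succ]
    · intro j hj
      rw [← pvIt_succ]
      rw [Bool.eq_false_iff]
      intro hc
      rw [PySem.Set.contains_iff, PySem.Set.mem_add] at hc
      rcases hc with hmem | heq
      · have h1 : PySem.Set.contains seen (pvIt m (j+1) x) = false := hseen (j+1) (by omega)
        have h2 := (PySem.Set.contains_iff seen (pvIt m (j+1) x)).2 hmem
        rw [h1] at h2
        simp at h2
      · exact hdist 0 (j+1) (by omega) (by omega) (by rw [pvIt_zero, heq])
    · intro i j hij hjs
      rw [← pvIt_succ, ← pvIt_succ]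
      exact hdist (i+1) (j+1) (by omega) (by omega)

lemma pvAWalk_none (m : List (String × String)) (vis : List String) :
    ∀ f (seen : PySem.Set String) (x : String),
      (∀ s, ¬ pvGood m vis x s) →
      PySem.Set.contains vis (pvAWalk (PySem.Dict.mk m) vis f seen x) = false := by
  intro f
  induction f with
  | zero =>
    intro seen x hnone
    rw [pvAWalk]
    rw [Bool.eq_false_iff]
    intro hv
    exact hnone 0 ⟨fun j hj => absurd hj (by omega), by rwa [pvIt_zero]⟩
  | succ f ih =>
    intro seen x hnone
    have hxv : PySem.Set.contains vis x = false := by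
      rw [Bool.eq_false_iff]
      intro hv
      exact hnone 0 ⟨fun j hj => absurd hj (by omega), by rwa [pvIt_zero]⟩
    rw [pvAWalk]
    by_cases hc : ((PySem.Dict.mk m).contains x && !PySem.Set.contains vis x && !PySem.Set.contains seen x) = true
    · rw [if_pos hc]
      simp only [Bool.and_eq_true, Bool.not_eq_true'] at hc
      have hokx : pvOk m vis x = true := by
        unfold pvOk
        rw [hc.1.1, hc.1.2]
        rfl
      apply ih
      intro s hs
      exact hnone (s+1) ((pvGood_shift m vis hokx s).2 hs)
    · rw [if_neg hc]
      exact hxv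

-- the per-item result of A: record the walk's endpoint iff it is visible
lemma pvA_item (m : List (String × String)) (vis : List String) (k v : String)
    (hnd : (m.map Prod.fst).Nodup) (hkv : (k, v) ∈ m) :
    (if PySem.Set.contains vis (pvAWalk (PySem.Dict.mk m) vis (m.length + 1) (PySem.Set.add PySem.Set.empty k) v) = true
     then some (pvAWalk (PySem.Dict.mk m) vis (m.length + 1) (PySem.Set.add PySem.Set.empty k) v)
     else none) = pvRes m vis v := by
  have hnxtk : pvNxt m k = v := by
    have hget : (PySem.Dict.mk m).get? k = some v := by
      apply PySem.Dict.get?_of_mem_items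
      · exact hkv
      · simpa [PySem.Dict.keys] using hnd
    simp [pvNxt, PySem.Dict.getD_eq_get?_getD, hget]
  rcases pvRes_spec m vis v with ⟨hres, hnone⟩ | ⟨s, hres, hg, hmin⟩
  · rw [hres]
    rw [pvAWalk_none m vis _ _ _ hnone]
    simp
  · have hdist := pv_prefix_distinct m vis v s hg hmin
    have hbound : s ≤ m.length := by
      apply pv_len_bound m vis v s hg.1
      intro i1 i2 h1 h2
      exact hdist i1 i2 h1 (by omega)
    have hwalk : pvAWalk (PySem.Dict.mk m) vis (m.length + 1) (PySem.Set.add PySem.Set.empty k) v = pvIt m s v := by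
      apply pvAWalk_some m vis s (m.length + 1) _ v hg.1 hg.2 ?_ hdist (by omega)
      intro j hj
      rw [Bool.eq_false_iff]
      intro hc
      rw [PySem.Set.contains_iff, PySem.Set.mem_add] at hc
      rcases hc with hmem | heq
      · simp [PySem.Set.empty] at hmem
      · -- the chain would pass through k, and nxt k = v duplicates index 0
        have hdup : pvIt m (j+1) v = pvIt m 0 v := by
          rw [pvIt_succ', heq, hnxtk, pvIt_zero]
        exact hdist 0 (j+1) (by omega) (by omega) hdup.symm
    rw [hwalk, hres, if_pos hg.2]

-- ---- B's memoized walk computes pvRes ----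

lemma pvBLoop_correct (m : List (String × String)) (vis : List String)
    (memo : PySem.Dict String (Option String)) (y : String) (hInv : pvInv m vis memo) :
    ∀ f j (p : List String) (onp : PySem.Set String),
      pvOkTo m vis j y →
      (∀ i1 i2, i1 < i2 → i2 < j → pvIt m i1 y ≠ pvIt m i2 y) →
      (∀ z, PySem.Set.contains onp z = true ↔ ∃ i, i < j ∧ pvIt m i y = z) →
      p = (List.range j).map (fun i => pvIt m i y) →
      m.length + 1 ≤ f + j →
      ∃ J, j ≤ J ∧ pvOkTo m vis J y ∧
        pvBLoop (PySem.Dict.mk m) vis memo f p onp (pvIt m j y)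
          = (pvRes m vis (pvIt m j y), (List.range J).map (fun i => pvIt m i y)) := by
  intro f
  induction f with
  | zero =>
    intro j p onp hok hdist honp hp hf
    exfalso
    have := pv_len_bound m vis y j hok hdist
    omega
  | succ f ih =>
    intro j p onp hok hdist honp hp hf
    by_cases hv : PySem.Set.contains vis (pvIt m j y) = true
    · refine ⟨j, le_refl _, hok, ?_⟩
      rw [pvBLoop, if_pos hv, pvRes_vis m vis _ hv, hp]
    · rw [Bool.not_eq_true] at hv
      by_cases hmemo : ∃ r, memo.get? (pvIt m j y) = some r
      · obtain ⟨r, hr⟩ := hmemo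
        refine ⟨j, le_refl _, hok, ?_⟩
        rw [pvBLoop, if_neg (by rw [hv]; simp)]
        simp only [hr]
        rw [hInv _ r hr, hp]
      · have hget : memo.get? (pvIt m j y) = none := by
          cases h : memo.get? (pvIt m j y) with
          | none => rfl
          | some r => exact absurd h (fun hh => hmemo ⟨r, hh⟩)
        by_cases hpath : PySem.Set.contains onp (pvIt m j y) = true
        · -- cycle: the current node is already on the path
          obtain ⟨i, hi, heq⟩ := (honp _).1 hpath
          have hcyc : pvIt m (j - i) (pvIt m j y) = pvIt m j y := by
            conv_lhs => rw [← heq]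
            rw [← pvIt_add, show j - i + i = j from by omega]
          have hokx : pvOkTo m vis (j - i) (pvIt m j y) := by
            intro n hn
            conv_lhs => rw [← heq]
            rw [← pvIt_add]
            exact hok (n + i) (by omega)
          have hres : pvRes m vis (pvIt m j y) = none :=
            pvRes_cycle m vis _ (j - i) (by omega) hcyc hokx
          refine ⟨j, le_refl _, hok, ?_⟩
          rw [pvBLoop, if_neg (by rw [hv]; simp)]
          simp only [hget]
          rw [if_pos (by rw [hpath]; simp), hres, hp]
        · rw [Bool.not_eq_true] at hpath
          by_cases hkey : (PySem.Dict.mk m).contains (pvIt m j y) = true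
          · -- step to the successor
            have hokx : pvOk m vis (pvIt m j y) = true := by
              unfold pvOk
              rw [hkey, hv]
              rfl
            have hok' : pvOkTo m vis (j+1) y := by
              intro n hn
              rcases Nat.lt_or_ge n j with h | h
              · exact hok n h
              · have hnj : n = j := by omega
                rw [hnj]
                exact hokx
            have hdist' : ∀ i1 i2, i1 < i2 → i2 < j + 1 → pvIt m i1 y ≠ pvIt m i2 y := by
              intro i1 i2 h1 h2 heq
              rcases Nat.lt_or_ge i2 j with h | h
              · exact hdist i1 i2 h1 h heq
              · have hi2 : i2 = j := by omega
                rw [hi2] at heq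
                have hcon : PySem.Set.contains onp (pvIt m j y) = true :=
                  (honp (pvIt m j y)).2 ⟨i1, by omega, heq⟩
                rw [hpath] at hcon
                simp at hcon
            obtain ⟨J, hJ, hokJ, hrec⟩ := ih (j+1) (p ++ [pvIt m j y]) (PySem.Set.add onp (pvIt m j y))
              hok' hdist'
              (by
                intro z
                rw [PySem.Set.contains_iff, PySem.Set.mem_add]
                constructor
                · rintro (hz | rfl)
                  · obtain ⟨i, hi, hiz⟩ := (honp z).1 ((PySem.Set.contains_iff onp z).2 hz)
                    exact ⟨i, by omega, hiz⟩
                  · exact ⟨j, by omega, rfl⟩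
                · rintro ⟨i, hi, rfl⟩
                  rcases Nat.lt_or_ge i j with h | h
                  · left
                    have := (honp (pvIt m i y)).2 ⟨i, h, rfl⟩
                    rwa [← PySem.Set.contains_iff]
                  · right
                    have : i = j := by omega
                    rw [this])
              (by rw [hp, List.range_succ, List.map_append]; simp)
              (by omega)
            refine ⟨J, by omega, hokJ, ?_⟩
            rw [pvBLoop, if_neg (by rw [hv]; simp)]
            simp only [hget]
            rw [if_neg (by rw [hpath, hkey]; simp)]
            have hnext : (PySem.Dict.mk m).getD (pvIt m j y) "" = pvNxt m (pvIt m j y) := rfl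
            rw [hnext, ← pvIt_succ' m j y, hrec, pvIt_succ' m j y,
              ← pvRes_step m vis _ hokx]
          · rw [Bool.not_eq_true] at hkey
            refine ⟨j, le_refl _, hok, ?_⟩
            rw [pvBLoop, if_neg (by rw [hv]; simp)]
            simp only [hget]
            rw [if_pos (by rw [hpath, hkey]; simp), pvRes_stuck m vis _ hv hkey, hp]

lemma pvInv_update (m : List (String × String)) (vis : List String) (r : Option String) :
    ∀ (path : List String) (memo : PySem.Dict String (Option String)),
      pvInv m vis memo → (∀ n ∈ path, pvRes m vis n = r) →
      pvInv m vis (path.foldl (fun mm n => mm.insert n r) memo) := by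
  intro path
  induction path with
  | nil => intro memo hInv _; exact hInv
  | cons n path ih =>
    intro memo hInv hvals
    rw [List.foldl_cons]
    apply ih
    · intro x rx hx
      rw [PySem.Dict.get?_insert] at hx
      split_ifs at hx with hxe
      · cases hx; rw [hxe]; exact hvals n (by simp)
      · exact hInv x rx hx
    · intro z hz
      exact hvals z (by simp [hz])

-- B's outer fold tracks the reference fold, with the memo invariant carried along
lemma pvB_fold (m : List (String × String)) (vis : List String) :
    ∀ (l : List (String × String)) (memo : PySem.Dict String (Option String))
      (out : PySem.Dict String String), pvInv m vis memo →
      (l.foldl (pvBStep (PySem.Dict.mk m) vis (m.length + 1)) (memo, out)).2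
        = l.foldl (pvRefStep m vis) out := by
  intro l
  induction l with
  | nil => intro memo out _; rfl
  | cons kv l ih =>
    intro memo out hInv
    rw [List.foldl_cons, List.foldl_cons]
    by_cases hv : PySem.Set.contains vis kv.1 = true
    · have h1 : pvBStep (PySem.Dict.mk m) vis (m.length + 1) (memo, out) kv = (memo, out) := by
        rw [pvBStep, if_neg (by rw [hv]; simp)]
      have h2 : pvRefStep m vis out kv = out := by
        rw [pvRefStep, if_pos hv]
      rw [h1, h2]
      exact ih memo out hInv
    · rw [Bool.not_eq_true] at hv
      obtain ⟨J, hJ, hokJ, hloop⟩ := pvBLoop_correct m vis memo kv.2 hInv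
        (m.length + 1) 0 [] PySem.Set.empty
        (fun j hj => absurd hj (by omega))
        (fun i1 i2 h1 h2 => absurd h2 (by omega))
        (by intro z; simp [PySem.Set.empty, PySem.Set.contains])
        (by simp)
        (by omega)
      rw [pvIt_zero] at hloop
      have hvals : ∀ n ∈ (List.range J).map (fun i => pvIt m i kv.2), pvRes m vis n = pvRes m vis kv.2 := by
        intro n hn
        obtain ⟨i, hi, rfl⟩ := List.mem_map.1 hn
        exact pvRes_chain m vis kv.2 J hokJ i (le_of_lt (List.mem_range.1 hi))
      have hstep : pvBStep (PySem.Dict.mk m) vis (m.length + 1) (memo, out) kv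
          = ((((List.range J).map (fun i => pvIt m i kv.2)).foldl
                (fun mm n => mm.insert n (pvRes m vis kv.2)) memo),
             pvRefStep m vis out kv) := by
        rw [pvBStep, if_pos (by rw [hv]; simp)]
        rw [pvRefStep, if_neg (by rw [hv]; simp)]
        simp only [hloop]
        cases hres : pvRes m vis kv.2 <;> simp
      rw [hstep]
      apply ih
      apply pvInv_update m vis (pvRes m vis kv.2) _ memo hInv
      intro n hn
      exact hvals n hn

lemma pvA_fold (m : List (String × String)) (vis : List String)
    (hnd : (m.map Prod.fst).Nodup) :
    m.foldl (pvAStep (PySem.Dict.mk m) vis (m.length + 1)) PySem.Dict.empty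
      = m.foldl (pvRefStep m vis) PySem.Dict.empty := by
  apply PySem.List.foldl_congr_mem
  intro acc kv hkv
  by_cases hv : PySem.Set.contains vis kv.1 = true
  · rw [pvAStep, pvRefStep, if_pos hv, if_pos hv]
  · rw [Bool.not_eq_true] at hv
    have hitem := pvA_item m vis kv.1 kv.2 hnd hkv
    have hnv : ¬ (PySem.Set.contains vis kv.1 = true) := by rw [hv]; simp
    rw [pvAStep, pvRefStep, if_neg hnv, if_neg hnv]
    cases hres : pvRes m vis kv.2 with
    | none =>
      rw [hres] at hitem
      have hvc : PySem.Set.contains vis (pvAWalk (PySem.Dict.mk m) vis (m.length + 1) (PySem.Set.add PySem.Set.empty kv.1) kv.2) = false := by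
        by_contra h
        rw [Bool.not_eq_false] at h
        rw [if_pos h] at hitem
        cases hitem
      simp only [hvc]
      simp
    | some t =>
      rw [hres] at hitem
      have hvc : PySem.Set.contains vis (pvAWalk (PySem.Dict.mk m) vis (m.length + 1) (PySem.Set.add PySem.Set.empty kv.1) kv.2) = true := by
        by_contra h
        rw [Bool.not_eq_true] at h
        rw [if_neg (by rw [h]; simp)] at hitem
        cases hitem
      have hwv : pvAWalk (PySem.Dict.mk m) vis (m.length + 1) (PySem.Set.add PySem.Set.empty kv.1) kv.2 = t := by
        rw [if_pos hvc] at hitem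
        exact Option.some.inj hitem
      show (if PySem.Set.contains vis (pvAWalk (PySem.Dict.mk m) vis (m.length + 1) (PySem.Set.add PySem.Set.empty kv.1) kv.2) = true
            then acc.insert kv.1 (pvAWalk (PySem.Dict.mk m) vis (m.length + 1) (PySem.Set.add PySem.Set.empty kv.1) kv.2)
            else acc) = acc.insert kv.1 t
      rw [hwv, if_pos (hwv ▸ hvc)]

-- ===== VERDICT (by name: the statement is the Claim_ definition above) =====
theorem resolve_merged_identifier_map_py_spec : Claim_equal_resolve_merged_identifier_map_py := by
  intro m vis _ hpre
  unfold Spec_resolve_merged_identifier_map_py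
  show resolve_merged_identifier_map_py m vis = resolve_merged_identifier_map_py_alt m vis
  simp only [resolve_merged_identifier_map_py, resolve_merged_identifier_map_py_alt]
  rw [pvA_fold m vis hpre]
  rw [pvB_fold m vis m PySem.Dict.empty PySem.Dict.empty
    (by intro x r hx; simp [PySem.Dict.get?, PySem.Dict.empty] at hx)]
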